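-- pv_equiv track=rewrite | github.com/EdwardChhun/CISP440 | week6/hotSprings.py | ifSpringsAndCountsAgree
-- ===== SOURCE A (Python) =====
-- def ifSpringsAndCountsAgree(row) -> bool:
--     """Function that takes in a row indicating a row of "springs" and
--     the its count such that "." means operational and "#" means damaged
--
--     Ex: #.#.### 1,1,3
--
--     Args:
--         row (str): takes in a row of springs and counts
--
--     Returns:
--         bool: returns (true) if the springs and counts agree, (false) if they don't
--     """
--
--     # Split the row of springs and count into 2 separate strings
--     damaged, count = row.split(" ")
--     # Keeping current counts of the damaged springs
--     # to later verify if matches the input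
--     currentDamaged = 0
--     currentCount = []
--
--     for i in damaged:
--         if i == "#":
--             currentDamaged += 1
--         else:
--             if currentDamaged:
--                 currentCount.append(currentDamaged)
--             currentDamaged = 0
--
--     if currentDamaged:
--         currentCount.append(currentDamaged)
--
--     # If the current count is equal to the original count
--     return ",".join(map(str,currentCount)) == count
-- ===== SOURCE B (Python) =====
-- import re
--
-- def ifSpringsAndCountsAgree(row) -> bool:
--     damaged, count = row.split(" ")
--     return ",".join(str(len(r)) for r in re.findall(r'#+', damaged)) == count
-- ===== Notes on version B (the rewrite author's own statement) =====
-- stated objective: idiomatic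
-- what changed: Replaces the explicit counter/accumulator state machine over each character by regex extraction of the maximal '#' runs (re.findall(r'#+')) followed by a join-and-compare one-liner.
import Mathlib
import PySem

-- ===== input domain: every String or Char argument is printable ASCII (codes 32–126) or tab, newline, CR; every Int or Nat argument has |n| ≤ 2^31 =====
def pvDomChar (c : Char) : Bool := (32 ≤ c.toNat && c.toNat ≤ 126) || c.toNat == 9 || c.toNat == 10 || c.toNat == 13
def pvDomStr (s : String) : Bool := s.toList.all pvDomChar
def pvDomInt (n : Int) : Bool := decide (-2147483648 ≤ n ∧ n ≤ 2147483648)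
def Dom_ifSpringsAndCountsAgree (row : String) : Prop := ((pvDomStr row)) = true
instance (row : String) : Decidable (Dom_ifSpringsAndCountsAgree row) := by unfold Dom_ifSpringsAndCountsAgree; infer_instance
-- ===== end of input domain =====

-- ===== PORT A =====
-- B extracts the maximal '#' runs in one shot instead of A's running-counter state machine; idiomatic re-decomposition, same cost.
-- loop body of 'for i in damaged'
def stepA (st : Nat × List Nat) (i : Char) : Nat × List Nat :=
  if i = '#' then (st.1 + 1, st.2)
  else if st.1 ≠ 0 then (0, st.2 ++ [st.1]) else (0, st.2)

-- the trailing 'if currentDamaged: currentCount.append(currentDamaged)'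
def finalizeA (st : Nat × List Nat) : List Nat :=
  if st.1 ≠ 0 then st.2 ++ [st.1] else st.2

def ifSpringsAndCountsAgree (row : String) : Bool :=
  match PySem.Chars.splitOn row.toList [' '] with
  | [damaged, count] =>
    let currentCount := finalizeA (damaged.foldl stepA (0, []))
    PySem.Str.join "," (currentCount.map (fun n => PySem.Int.toStr (Int.ofNat n))) == String.ofList count
  | _ => false   -- unreachable under Pre_: Python raises ValueError here

-- ===== PORT B =====
-- re.findall(r'#+', damaged) = the maximal runs of '#'; B only needs their lengths.
def hashRuns : List Char → List Nat
  | [] => []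
  | c :: cs =>
    if c = '#' then
      (1 + (cs.takeWhile (· = '#')).length) :: hashRuns (cs.dropWhile (· = '#'))
    else hashRuns cs
termination_by l => l.length
decreasing_by
  · simpa [List.length_cons] using Nat.lt_succ_of_le (List.length_dropWhile_le _ _)
  · simp [List.length_cons]

def ifSpringsAndCountsAgree_alt (row : String) : Bool :=
  let parts := PySem.Chars.splitOn row.toList [' ']
  if parts.length == 2 then
    PySem.Str.join "," ((hashRuns parts[0]!).map (fun n => PySem.Int.toStr (Int.ofNat n))) == String.ofList parts[1]!
  else false   -- unreachable under Pre_: Python raises ValueError here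

-- ===== PRECONDITION & SPEC =====
-- Pre_ excludes exactly the rows where 'damaged, count = row.split(" ")' raises ValueError (not exactly one space).
def Pre_ifSpringsAndCountsAgree (row : String) : Prop :=
  (PySem.Chars.splitOn row.toList [' ']).length = 2
instance (row : String) : Decidable (Pre_ifSpringsAndCountsAgree row) := by unfold Pre_ifSpringsAndCountsAgree; infer_instance
def pvWitness_ifSpringsAndCountsAgree : String := "#.#.### 1,1,3"
def Spec_ifSpringsAndCountsAgree (row : String) (out : Bool) : Prop := out = ifSpringsAndCountsAgree_alt row
instance (row : String) (out : Bool) : Decidable (Spec_ifSpringsAndCountsAgree row out) := by unfold Spec_ifSpringsAndCountsAgree; infer_instance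

-- ===== CLAIM (what is proved, stated in full; the proofs are below) =====
def Claim_equal_ifSpringsAndCountsAgree : Prop := ∀ (row : String), Dom_ifSpringsAndCountsAgree row → Pre_ifSpringsAndCountsAgree row → Spec_ifSpringsAndCountsAgree row (ifSpringsAndCountsAgree row)

-- ===== LEMMAS AND PROOFS =====

-- A's state machine re-expressed recursively: pending counter cd, then the rest of the list.
def runsAux (cd : Nat) : List Char → List Nat
  | [] => if cd ≠ 0 then [cd] else []
  | c :: cs => if c = '#' then runsAux (cd + 1) cs
               else (if cd ≠ 0 then [cd] else []) ++ runsAux 0 cs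

theorem foldl_runsAux (l : List Char) (cd : Nat) (cc : List Nat) :
    finalizeA (l.foldl stepA (cd, cc)) = cc ++ runsAux cd l := by
  induction l generalizing cd cc with
  | nil => by_cases h : cd = 0 <;> simp [finalizeA, runsAux, h]
  | cons c cs ih =>
    by_cases hc : c = '#'
    · have hs : stepA (cd, cc) c = (cd + 1, cc) := by simp [stepA, hc]
      simp only [List.foldl_cons, hs, ih, runsAux, if_pos hc]
    · by_cases hcd : cd = 0
      · subst hcd
        have hs : stepA (0, cc) c = (0, cc) := by simp [stepA, hc]
        simp [List.foldl_cons, hs, ih, runsAux, hc]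
      · have hs : stepA (cd, cc) c = (0, cc ++ [cd]) := by simp [stepA, hc, hcd]
        simp [List.foldl_cons, hs, ih, runsAux, hc, hcd]

theorem runsAux_eq (l : List Char) : ∀ cd : Nat,
    runsAux cd l = if cd = 0 then hashRuns l
      else (cd + (l.takeWhile (· = '#')).length) :: hashRuns (l.dropWhile (· = '#')) := by
  induction l with
  | nil => intro cd; by_cases h : cd = 0 <;> simp [runsAux, hashRuns, h]
  | cons c cs ih =>
    intro cd
    by_cases hc : c = '#'
    · by_cases hcd : cd = 0
      · simp [runsAux, hc, hcd, ih, hashRuns]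
      · have h1 : cd + 1 ≠ 0 := by omega
        simp only [runsAux, if_pos hc, ih, if_neg h1, if_neg hcd]
        simp [hc]
        omega
    · by_cases hcd : cd = 0
      · simp [runsAux, hc, hcd, ih, hashRuns]
      · simp [runsAux, hc, hcd, ih, hashRuns]

-- ===== VERDICT (by name: the statement is the Claim_ definition above) =====
theorem ifSpringsAndCountsAgree_spec : Claim_equal_ifSpringsAndCountsAgree := by
  intro row _ _
  unfold Spec_ifSpringsAndCountsAgree ifSpringsAndCountsAgree ifSpringsAndCountsAgree_alt
  cases h : PySem.Chars.splitOn row.toList [' '] with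
  | nil => rfl
  | cons a t =>
    cases t with
    | nil => rfl
    | cons b t2 =>
      cases t2 with
      | nil =>
        simp only [List.length_cons, List.length_nil]
        rw [foldl_runsAux a 0 [], runsAux_eq]
        simp
      | cons c t3 => rfl
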